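-- pv_equiv track=rewrite | github.com/Sopraz/Work | AlgroProg_Exercices Dauphine.py | coupeinul
-- ===== SOURCE A (Python) =====
-- def coupeinul(i,S):
--     min = sum(S[i-1:])
--     g = i-1
--     s = 0
--     while g<len(S):
--         for i in range(g,len(S)):
--             s += S[i]
--         if s<min:
--             min = s
--         s = 0
--         g+= 1
--     return min
-- ===== SOURCE B (Python) =====
-- def coupeinul(i, S):
--     # one right-to-left pass: running suffix sum, track the minimum
--     n = len(S)
--     start = i - 1 if i >= 1 else max(n + i - 1, 0)
--     best = None
--     running = 0
--     for x in reversed(S[start:]):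
--         running += x
--         if best is None or running < best:
--             best = running
--     return 0 if best is None else best
-- ===== Notes on version B (the rewrite author's own statement) =====
-- stated objective: faster
-- what changed: A recomputes every suffix sum from scratch with a nested loop; B makes a single right-to-left pass keeping a running suffix sum and its minimum.
-- intended difference: For i <= 0 with sum(S) < 0, or with some suffix starting before index len(S)+i-1 summing strictly below every suffix from that index on, A's inner loop wraps negative indices so A returns a minimum contaminated by wrapped sums, while B returns the minimum suffix sum of S[i-1:] under Python's normal negative-slice meaning, which is the intended value. — e.g. on coupeinul(0, [-1, 5]): A returns 4, B returns 5
import Mathlib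
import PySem

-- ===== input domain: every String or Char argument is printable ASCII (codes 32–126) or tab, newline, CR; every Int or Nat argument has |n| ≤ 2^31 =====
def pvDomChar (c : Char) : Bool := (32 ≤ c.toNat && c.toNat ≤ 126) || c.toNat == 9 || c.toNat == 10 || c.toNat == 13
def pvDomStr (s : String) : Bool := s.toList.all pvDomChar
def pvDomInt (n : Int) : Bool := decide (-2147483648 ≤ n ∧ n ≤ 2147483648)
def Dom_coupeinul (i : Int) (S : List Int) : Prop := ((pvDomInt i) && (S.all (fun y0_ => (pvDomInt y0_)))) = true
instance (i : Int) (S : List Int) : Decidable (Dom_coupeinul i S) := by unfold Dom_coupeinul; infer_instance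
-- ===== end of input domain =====

-- B replaces A's quadratic nested recomputation of every suffix sum by one O(n)
-- right-to-left pass (running suffix sum, tracked minimum).

-- ===== PORT A =====
-- inner 'for i in range(g, len(S)): s += S[i]' (pyGetD's default is only reached outside Pre_, where Python raises IndexError)
def pvInnerA (S : List Int) (g : Int) : Int :=
  (PySem.List.pyRange g (S.length : Int) 1).foldl (fun s k => s + PySem.List.pyGetD S k 0) 0

-- 'while g < len(S)' loop; fuel bounds the number of iterations
def pvLoopA (S : List Int) (fuel : Nat) (g : Int) (mn : Int) : Int :=
  match fuel with
  | 0 => mn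
  | Nat.succ f =>
    if g < (S.length : Int) then
      let s := pvInnerA S g
      pvLoopA S f (g + 1) (if s < mn then s else mn)
    else mn

def coupeinul (i : Int) (S : List Int) : Int :=
  pvLoopA S ((S.length : Int) - (i - 1)).toNat (i - 1)
    ((PySem.List.slice S (some (i - 1)) none).sum)

-- ===== PORT B =====
-- one step of B's scan: extend the running suffix sum and the tracked minimum
def pvStepB (p : Int × Option Int) (x : Int) : Int × Option Int :=
  (p.1 + x, some (match p.2 with | none => p.1 + x | some v => if p.1 + x < v then p.1 + x else v))

def coupeinul_alt (i : Int) (S : List Int) : Int :=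
  match (((PySem.List.slice S
      (some (if 1 ≤ i then i - 1 else max ((S.length : Int) + i - 1) 0)) none).reverse).foldl
        pvStepB (0, none)).2 with
  | none => 0
  | some b => b

-- ===== PRECONDITION & SPEC =====
-- Pre_ excludes exactly the inputs where A raises IndexError (inner loop index below -len(S)).
def Pre_coupeinul (i : Int) (S : List Int) : Prop := 1 - (S.length : Int) ≤ i
instance (i : Int) (S : List Int) : Decidable (Pre_coupeinul i S) := by unfold Pre_coupeinul; infer_instance
def pvWitness_coupeinul : Int × List Int := (1, [2, -3, 4])

-- For i ≤ 0, when sum(S) < 0 or some suffix starting before index len(S)+i-1 sums strictly below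
-- every suffix starting at or after it, A's inner loop wraps negative indices and returns a minimum
-- contaminated by wrapped sums, strictly below the true answer; B returns the minimum suffix sum of
-- S[i-1:] under Python's normal negative-slice meaning, which is the intended value.
def D_coupeinul (i : Int) (S : List Int) : Prop :=
  i ≤ 0 ∧ (S.sum < 0 ∨ ∃ t1 ∈ S.tails, 1 - i < (t1.length : Int) ∧
    ∀ t2 ∈ S.tails, t2 ≠ [] → (t2.length : Int) ≤ 1 - i → t1.sum < t2.sum)
instance (i : Int) (S : List Int) : Decidable (D_coupeinul i S) := by unfold D_coupeinul; infer_instance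

def Spec_coupeinul (i : Int) (S : List Int) (out : Int) : Prop := ¬ D_coupeinul i S → out = coupeinul_alt i S
instance (i : Int) (S : List Int) (out : Int) : Decidable (Spec_coupeinul i S out) := by unfold Spec_coupeinul; infer_instance

def pvDiffWitness_coupeinul : Int × List Int := (0, [-1, 5])
def pvDiffWitnessOut_coupeinul : Int × Int := (4, 5)

-- ===== CLAIM (what is proved, stated in full; the proofs are below) =====
def Claim_unchanged_coupeinul : Prop := ∀ (i : Int) (S : List Int), Dom_coupeinul i S → Pre_coupeinul i S → Spec_coupeinul i S (coupeinul i S)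
def Claim_exact_coupeinul : Prop := ∀ (i : Int) (S : List Int), Dom_coupeinul i S → Pre_coupeinul i S → D_coupeinul i S → coupeinul i S ≠ coupeinul_alt i S
def Claim_changed_coupeinul : Prop := Dom_coupeinul (pvDiffWitness_coupeinul.1) (pvDiffWitness_coupeinul.2) ∧ Pre_coupeinul (pvDiffWitness_coupeinul.1) (pvDiffWitness_coupeinul.2) ∧ D_coupeinul (pvDiffWitness_coupeinul.1) (pvDiffWitness_coupeinul.2) ∧ coupeinul (pvDiffWitness_coupeinul.1) (pvDiffWitness_coupeinul.2) = pvDiffWitnessOut_coupeinul.1 ∧ coupeinul_alt (pvDiffWitness_coupeinul.1) (pvDiffWitness_coupeinul.2) = pvDiffWitnessOut_coupeinul.2 ∧ pvDiffWitnessOut_coupeinul.1 ≠ pvDiffWitnessOut_coupeinul.2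

-- ===== LEMMAS AND PROOFS =====

-- minimum-suffix machine: (sum of L, minimum over the nonempty suffix sums of L)
def msuf (L : List Int) : Int × Option Int :=
  L.foldr (fun x p => pvStepB p x) (0, none)

theorem msuf_cons (x : Int) (xs : List Int) :
    msuf (x :: xs) =
      ((msuf xs).1 + x,
        some (match (msuf xs).2 with
              | none => (msuf xs).1 + x
              | some v => if (msuf xs).1 + x < v then (msuf xs).1 + x else v)) := by
  simp [msuf, pvStepB]

theorem msuf_fst (L : List Int) : (msuf L).1 = L.sum := by
  induction L with
  | nil => simp [msuf]
  | cons x xs ih => rw [msuf_cons]; simp only [List.sum_cons, ih]; omega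

theorem msuf_snd_le (x : Int) (xs : List Int) :
    ∃ v, (msuf (x :: xs)).2 = some v ∧ v ≤ (msuf (x :: xs)).1 := by
  rw [msuf_cons]
  refine ⟨_, rfl, ?_⟩
  cases (msuf xs).2 with
  | none => exact le_refl _
  | some v =>
      simp only []
      split_ifs with h
      · exact le_refl _
      · exact not_lt.mp h

-- the while-loop's 'update the minimum, then fold the rest' commutes with msuf's cons step
theorem step_comm (r mn : Int) (o : Option Int) :
    (match o with
     | none => (if r < mn then r else mn)
     | some v => if v < (if r < mn then r else mn) then v else (if r < mn then r else mn))
    = (match (some (match o with | none => r | some v => if r < v then r else v) : Option Int) with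
       | none => mn
       | some m => if m < mn then m else mn) := by
  cases o <;> simp only [] <;> split_ifs <;> omega

theorem innerA_eq (S : List Int) : ∀ (d g : Nat), S.length - g ≤ d →
    pvInnerA S (g : Int) = (S.drop g).sum := by
  intro d
  induction d with
  | zero =>
      intro g hg
      have hlen : S.length ≤ g := by omega
      simp [pvInnerA, PySem.List.pyRange_one_eq_nil
        (by exact_mod_cast hlen : (S.length : Int) ≤ (g : Int)),
        List.drop_eq_nil_of_le hlen]
  | succ f ih =>
      intro g hg
      by_cases hlt : g < S.length
      · have hcons : PySem.List.pyRange (g : Int) (S.length : Int) 1 =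
            (g : Int) :: PySem.List.pyRange ((g : Int) + 1) (S.length : Int) 1 :=
          PySem.List.pyRange_one_cons (by exact_mod_cast hlt)
        have hstep : ((g : Int) + 1) = (((g + 1 : Nat)) : Int) := by omega
        have ihg : pvInnerA S ((g + 1 : Nat) : Int) = (S.drop (g + 1)).sum := ih (g + 1) (by omega)
        have hfold : ∀ (c : Int) (l : List Int),
            l.foldl (fun s k => s + PySem.List.pyGetD S k 0) c
              = c + l.foldl (fun s k => s + PySem.List.pyGetD S k 0) 0 := by
          intro c l
          induction l generalizing c with
          | nil => simp
          | cons y ys ihl =>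
              simp only [List.foldl_cons]
              rw [ihl (c + PySem.List.pyGetD S y 0), ihl (0 + PySem.List.pyGetD S y 0)]
              ring
        have hget : PySem.List.pyGetD S (g : Int) 0 = S[g] := by
          rw [PySem.List.pyGetD_natCast]
          exact List.getD_eq_getElem S 0 hlt
        have hdrop : S.drop g = S[g] :: S.drop (g + 1) := List.drop_eq_getElem_cons hlt
        simp only [pvInnerA] at *
        rw [hcons, List.foldl_cons, hfold, hstep, ihg, hdrop, List.sum_cons, hget]
        ring
      · have hlen : S.length ≤ g := by omega
        simp [pvInnerA, PySem.List.pyRange_one_eq_nil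
          (by exact_mod_cast hlen : (S.length : Int) ≤ (g : Int)),
          List.drop_eq_nil_of_le hlen]

theorem loopA_eq (S : List Int) : ∀ (fuel : Nat) (g : Nat) (mn : Int), S.length ≤ g + fuel →
    pvLoopA S fuel (g : Int) mn =
      (match (msuf (S.drop g)).2 with | none => mn | some v => if v < mn then v else mn) := by
  intro fuel
  induction fuel with
  | zero =>
      intro g mn hg
      have hnil : S.drop g = [] := List.drop_eq_nil_of_le (by omega)
      simp [pvLoopA, hnil, msuf]
  | succ f ih =>
      intro g mn hg
      by_cases hlt : g < S.length
      · have hc : ((g : Int)) < (S.length : Int) := by exact_mod_cast hlt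
        have hstep : ((g : Int) + 1) = (((g + 1 : Nat)) : Int) := by omega
        have hdrop : S.drop g = S[g] :: S.drop (g + 1) := List.drop_eq_getElem_cons hlt
        have hs : pvInnerA S (g : Int) = (msuf (S.drop (g + 1))).1 + S[g] := by
          rw [innerA_eq S (S.length - g) g (by omega), msuf_fst, hdrop, List.sum_cons]
          ring
        simp only [pvLoopA, if_pos hc, hs, hstep]
        rw [ih (g + 1) _ (by omega), hdrop, msuf_cons]
        exact step_comm ((msuf (S.drop (g + 1))).1 + S[g]) mn ((msuf (S.drop (g + 1))).2)
      · have hc : ¬ ((g : Int)) < (S.length : Int) := by exact_mod_cast hlt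
        have hnil : S.drop g = [] := List.drop_eq_nil_of_le (by omega)
        simp only [pvLoopA, if_neg hc, hnil, msuf, List.foldr_nil]


-- ===== machinery for the i ≤ 0 case =====

theorem msuf_none_iff (L : List Int) : (msuf L).2 = none ↔ L = [] := by
  cases L with
  | nil => simp [msuf]
  | cons x xs => rw [msuf_cons]; simp

theorem msuf_le_drop (L : List Int) : ∀ (v : Int), (msuf L).2 = some v →
    ∀ (g : Nat), g < L.length → v ≤ (L.drop g).sum := by
  induction L with
  | nil => intro v hv; simp [msuf] at hv
  | cons x xs ih =>
      intro v hv g hg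
      rw [msuf_cons] at hv
      cases g with
      | zero =>
          obtain ⟨w, hw, hle⟩ := msuf_snd_le x xs
          rw [msuf_cons] at hw
          rw [hv] at hw
          cases hw
          simpa [msuf_fst] using hle
      | succ g' =>
          simp only [List.length_cons] at hg
          cases h2 : (msuf xs).2 with
          | none =>
              rw [msuf_none_iff] at h2
              subst h2; simp at hg
          | some w =>
              rw [h2] at hv
              simp only [Option.some.injEq] at hv
              have hw := ih w h2 g' (by omega)
              simp only [List.drop_succ_cons]
              rw [← hv]
              split_ifs with h
              · exact le_trans (le_of_lt h) hw
              · exact hw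

theorem msuf_exists (L : List Int) : L ≠ [] →
    ∃ g, g < L.length ∧ (msuf L).2 = some ((L.drop g).sum) := by
  induction L with
  | nil => intro h; exact absurd rfl h
  | cons x xs ih =>
      intro _
      cases h2 : (msuf xs).2 with
      | none =>
          rw [msuf_none_iff] at h2
          subst h2
          exact ⟨0, by simp, by rw [msuf_cons]; simp [msuf]⟩
      | some w =>
          have hxs : xs ≠ [] := by
            intro h; rw [h] at h2; simp [msuf] at h2
          obtain ⟨g', hg', hrep⟩ := ih hxs
          rw [hrep] at h2
          cases h2
          by_cases hlt : (msuf xs).1 + x < (xs.drop g').sum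
          · refine ⟨0, by simp, ?_⟩
            rw [msuf_cons, hrep]
            simp only [List.drop_zero, List.sum_cons, Option.some.injEq, if_pos hlt]
            rw [msuf_fst]; ring
          · refine ⟨g' + 1, by simpa using Nat.succ_lt_succ hg', ?_⟩
            rw [msuf_cons, hrep]
            simp [if_neg hlt]

-- shift the accumulator out of the inner summing fold
theorem foldl_sum_shift (S : List Int) (c : Int) (l : List Int) :
    l.foldl (fun s k => s + PySem.List.pyGetD S k 0) c
      = c + l.foldl (fun s k => s + PySem.List.pyGetD S k 0) 0 := by
  induction l generalizing c with
  | nil => simp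
  | cons y ys ihl =>
      simp only [List.foldl_cons]
      rw [ihl (c + PySem.List.pyGetD S y 0), ihl (0 + PySem.List.pyGetD S y 0)]
      ring

-- inner sum at a negative index: Python's wraparound adds the whole-list sum
theorem innerA_neg (S : List Int) : ∀ (m : Nat), 1 ≤ m → m ≤ S.length →
    pvInnerA S (-(m : Int)) = (S.drop (S.length - m)).sum + S.sum := by
  intro m
  induction m with
  | zero => intro h; omega
  | succ m ihm =>
      intro _ hle
      have hlt : (-(((m : Nat) + 1 : Nat) : Int)) < (S.length : Int) := by
        push_cast; omega
      have hcons := PySem.List.pyRange_one_cons hlt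
      have hget := PySem.List.pyGetD_neg_natCast S (m + 1) 0 (by omega) hle
      have hdrop : S.drop (S.length - (m + 1)) = S[S.length - (m + 1)] :: S.drop (S.length - m) := by
        have h1 : S.length - (m + 1) + 1 = S.length - m := by omega
        rw [List.drop_eq_getElem_cons (by omega), h1]
      rcases Nat.eq_zero_or_pos m with hm0 | hm1
      · subst hm0
        have h0 : (-((0 + 1 : Nat) : Int)) + 1 = ((0 : Nat) : Int) := by omega
        have htot : pvInnerA S ((0 : Nat) : Int) = (S.drop 0).sum := innerA_eq S S.length 0 (by omega)
        simp only [pvInnerA] at *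
        rw [hcons, List.foldl_cons, foldl_sum_shift, h0, htot, hdrop, hget]
        simp only [Nat.sub_zero, List.drop_length, List.drop_zero, List.sum_cons, List.sum_nil]
        ring
      · have hstep : (-((m + 1 : Nat) : Int)) + 1 = -((m : Nat) : Int) := by omega
        have ih := ihm hm1 (by omega)
        simp only [pvInnerA] at *
        rw [hcons, List.foldl_cons, foldl_sum_shift, hstep, ih, hdrop, List.sum_cons, hget]
        ring

-- the while loop is a fold of 'keep the smaller' over the inner sums
theorem loopA_min (S : List Int) : ∀ (fuel : Nat) (g : Int) (mn : Int),
    (S.length : Int) ≤ g + fuel →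
    pvLoopA S fuel g mn =
      ((PySem.List.pyRange g (S.length : Int) 1).map (pvInnerA S)).foldl
        (fun a s => if s < a then s else a) mn := by
  intro fuel
  induction fuel with
  | zero =>
      intro g mn hg
      rw [PySem.List.pyRange_one_eq_nil (by omega)]
      simp [pvLoopA]
  | succ f ih =>
      intro g mn hg
      by_cases hlt : g < (S.length : Int)
      · rw [PySem.List.pyRange_one_cons hlt]
        simp only [pvLoopA, if_pos hlt, List.map_cons, List.foldl_cons]
        exact ih (g + 1) _ (by push_cast at hg ⊢; omega)
      · rw [PySem.List.pyRange_one_eq_nil (by omega)]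
        simp [pvLoopA, if_neg hlt]

theorem fmin_le_init (l : List Int) : ∀ (mn : Int),
    l.foldl (fun a s => if s < a then s else a) mn ≤ mn := by
  induction l with
  | nil => intro mn; simp
  | cons x xs ih =>
      intro mn
      simp only [List.foldl_cons]
      refine le_trans (ih _) ?_
      split_ifs with h
      · exact le_of_lt h
      · exact le_refl _

theorem fmin_le_mem (l : List Int) : ∀ (mn x : Int), x ∈ l →
    l.foldl (fun a s => if s < a then s else a) mn ≤ x := by
  induction l with
  | nil => intro mn x hx; simp at hx
  | cons y ys ih =>
      intro mn x hx
      simp only [List.foldl_cons]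
      rcases List.mem_cons.mp hx with h | h
      · subst h
        refine le_trans (fmin_le_init ys _) ?_
        split_ifs with h'
        · exact le_refl _
        · exact not_lt.mp h'
      · exact ih _ x h

theorem fmin_mem_or (l : List Int) : ∀ (mn : Int),
    l.foldl (fun a s => if s < a then s else a) mn = mn ∨
      l.foldl (fun a s => if s < a then s else a) mn ∈ l := by
  induction l with
  | nil => intro mn; left; rfl
  | cons x xs ih =>
      intro mn
      simp only [List.foldl_cons]
      rcases ih (if x < mn then x else mn) with h | h
      · rw [h]
        split_ifs with h'
        · right; exact List.mem_cons_self ..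
        · left; rfl
      · right; exact List.mem_cons_of_mem _ h

-- ===== VERDICT (by name: the statement is the Claim_ definition above) =====
theorem coupeinul_spec : Claim_unchanged_coupeinul := by
  intro i S _hD hPre hnD
  unfold Pre_coupeinul at hPre
  by_cases hi : 1 ≤ i
  · -- non-negative start: both sides are msuf on the same suffix
    set j : Nat := (i - 1).toNat with hj
    have hcast : (i - 1) = (j : Int) := by omega
    have hA : coupeinul i S =
        (match (msuf (S.drop j)).2 with
         | none => (S.drop j).sum
         | some v => if v < (S.drop j).sum then v else (S.drop j).sum) := by
      unfold coupeinul
      rw [hcast, PySem.List.slice_from_natCast]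
      exact loopA_eq S ((S.length : Int) - (↑j : Int)).toNat j _ (by omega)
    have hB : coupeinul_alt i S =
        (match (msuf (S.drop j)).2 with | none => 0 | some b => b) := by
      unfold coupeinul_alt
      rw [if_pos hi, hcast, PySem.List.slice_from_natCast, List.foldl_reverse]
      rfl
    rw [hA, hB]
    cases hd : S.drop j with
    | nil => simp [msuf]
    | cons x xs =>
        obtain ⟨v, hv, hle⟩ := msuf_snd_le x xs
        rw [msuf_fst] at hle
        rw [hv]
        simp only []
        split_ifs with h
        · rfl
        · exact le_antisymm (not_lt.mp h) hle
  · -- i ≤ 0: A wraps but, outside D_, the wrapped candidates never beat the true minimum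
    have hi0 : i ≤ 0 := by omega
    have hn : 1 ≤ S.length := by omega
    -- unpack ¬D_: the total is nonnegative and no early suffix beats all late ones
    unfold D_coupeinul at hnD
    have hX := mt (fun hx => And.intro hi0 hx) hnD
    push_neg at hX
    set s0 : Nat := ((S.length : Int) + i - 1).toNat with hs0def
    have hs0cast : ((s0 : Nat) : Int) = (S.length : Int) + i - 1 := by omega
    have hs0lt : s0 < S.length := by omega
    obtain ⟨ht, hE⟩ := hX
    -- A is a fold of 'keep the smaller' over the inner sums, seeded with the slice sum
    have hk1 : (i - 1) = -((((1 - i).toNat : Nat)) : Int) := by omega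
    have hmn0 : (PySem.List.slice S (some (i - 1)) none).sum = (S.drop s0).sum := by
      rw [hk1, PySem.List.slice_from_neg_natCast S ((1 - i).toNat) (by omega)]
      have heq : S.length - (1 - i).toNat = s0 := by omega
      rw [heq]
    have hA : coupeinul i S =
        ((PySem.List.pyRange (i - 1) (S.length : Int) 1).map (pvInnerA S)).foldl
          (fun a s => if s < a then s else a) ((S.drop s0).sum) := by
      unfold coupeinul
      rw [hmn0]
      exact loopA_min S _ (i - 1) _ (by omega)
    -- B is msuf of the clamped suffix
    have hmax : max ((S.length : Int) + i - 1) 0 = ((s0 : Nat) : Int) := by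
      rw [hs0cast]; exact max_eq_left (by omega)
    have hB : coupeinul_alt i S =
        (match (msuf (S.drop s0)).2 with | none => 0 | some b => b) := by
      unfold coupeinul_alt
      rw [if_neg hi, hmax, PySem.List.slice_from_natCast, List.foldl_reverse]
      rfl
    obtain ⟨g0, hg0, hrep⟩ := msuf_exists (S.drop s0) (by
      intro h
      have := congrArg List.length h
      simp only [List.length_drop, List.length_nil] at this
      omega)
    rw [List.length_drop] at hg0
    have hdd : (S.drop s0).drop g0 = S.drop (s0 + g0) := List.drop_drop
    rw [hdd] at hrep
    have hble : ∀ k : Nat, s0 ≤ k → k < S.length → (S.drop (s0 + g0)).sum ≤ (S.drop k).sum := by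
      intro k hk1' hk2'
      have h1 := msuf_le_drop (S.drop s0) _ hrep (k - s0) (by rw [List.length_drop]; omega)
      have h2 : (S.drop s0).drop (k - s0) = S.drop k := by
        rw [List.drop_drop]; congr 1; omega
      rw [h2] at h1
      exact h1
    rw [hA, hB, hrep]
    simp only []
    apply le_antisymm
    · -- A's fold sees the suffix sum B returns
      apply fmin_le_mem
      have hmem : ((s0 + g0 : Nat) : Int) ∈ PySem.List.pyRange (i - 1) (S.length : Int) 1 := by
        rw [PySem.List.mem_pyRange_one]
        constructor
        · push_cast; omega
        · push_cast; omega
      have hval : pvInnerA S ((s0 + g0 : Nat) : Int) = (S.drop (s0 + g0)).sum :=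
        innerA_eq S S.length _ (by omega)
      have hin := List.mem_map_of_mem (f := pvInnerA S) hmem
      rw [hval] at hin
      exact hin
    · -- every candidate A's loop considers is at least B's minimum
      rcases fmin_mem_or ((PySem.List.pyRange (i - 1) (S.length : Int) 1).map (pvInnerA S))
          ((S.drop s0).sum) with hcase | hcase
      · rw [hcase]
        exact hble s0 (le_refl _) hs0lt
      · obtain ⟨gI, hgI, hval⟩ := List.mem_map.mp hcase
        rw [← hval]
        rw [PySem.List.mem_pyRange_one] at hgI
        by_cases hgpos : 0 ≤ gI
        · obtain ⟨mg, hmg⟩ : ∃ m : Nat, gI = (m : Int) := ⟨gI.toNat, by omega⟩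
          subst hmg
          have hIv : pvInnerA S ((mg : Nat) : Int) = (S.drop mg).sum :=
            innerA_eq S S.length _ (by omega)
          rw [hIv]
          by_cases hge : s0 ≤ mg
          · exact hble _ hge (by omega)
          · have ht1 : S.drop mg ∈ S.tails := (List.mem_tails _ _).mpr (List.drop_suffix mg S)
            have hlen1 : 1 - i < ((S.drop mg).length : Int) := by
              rw [List.length_drop]; push_cast; omega
            obtain ⟨t2, ht2, hne, hlen2, hsle⟩ := hE (S.drop mg) ht1 hlen1
            obtain ⟨pre, hpre⟩ := (List.mem_tails _ _).mp ht2
            have hplen : pre.length + t2.length = S.length := by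
              have := congrArg List.length hpre
              simpa using this
            have h2pos : 0 < t2.length := List.length_pos_of_ne_nil hne
            have hk : S.drop pre.length = t2 := by rw [← hpre]; exact List.drop_left
            have hb2 := hble pre.length (by omega) (by omega)
            rw [hk] at hb2
            exact le_trans hb2 hsle
        · obtain ⟨mg, hmg, hm1, hm2⟩ : ∃ m : Nat, gI = -(m : Int) ∧ 1 ≤ m ∧ m ≤ S.length :=
            ⟨(-gI).toNat, by omega, by omega, by omega⟩
          subst hmg
          have hIv := innerA_neg S mg hm1 hm2
          rw [hIv]
          have hb := hble (S.length - mg) (by omega) (by omega)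
          omega

theorem coupeinul_changed : Claim_changed_coupeinul := by
  unfold Claim_changed_coupeinul; decide

theorem coupeinul_tight : Claim_exact_coupeinul := by
  intro i S _hD hPre hD
  unfold Pre_coupeinul at hPre
  unfold D_coupeinul at hD
  obtain ⟨hi0, hcases⟩ := hD
  have hi : ¬ 1 ≤ i := by omega
  have hn : 1 ≤ S.length := by omega
  set s0 : Nat := ((S.length : Int) + i - 1).toNat with hs0def
  have hs0cast : ((s0 : Nat) : Int) = (S.length : Int) + i - 1 := by omega
  have hs0lt : s0 < S.length := by omega
  have hk1 : (i - 1) = -((((1 - i).toNat : Nat)) : Int) := by omega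
  have hmn0 : (PySem.List.slice S (some (i - 1)) none).sum = (S.drop s0).sum := by
    rw [hk1, PySem.List.slice_from_neg_natCast S ((1 - i).toNat) (by omega)]
    have heq : S.length - (1 - i).toNat = s0 := by omega
    rw [heq]
  have hA : coupeinul i S =
      ((PySem.List.pyRange (i - 1) (S.length : Int) 1).map (pvInnerA S)).foldl
        (fun a s => if s < a then s else a) ((S.drop s0).sum) := by
    unfold coupeinul
    rw [hmn0]
    exact loopA_min S _ (i - 1) _ (by omega)
  have hmax : max ((S.length : Int) + i - 1) 0 = ((s0 : Nat) : Int) := by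
    rw [hs0cast]; exact max_eq_left (by omega)
  have hB : coupeinul_alt i S =
      (match (msuf (S.drop s0)).2 with | none => 0 | some b => b) := by
    unfold coupeinul_alt
    rw [if_neg hi, hmax, PySem.List.slice_from_natCast, List.foldl_reverse]
    rfl
  obtain ⟨g0, hg0, hrep⟩ := msuf_exists (S.drop s0) (by
    intro h
    have := congrArg List.length h
    simp only [List.length_drop, List.length_nil] at this
    omega)
  rw [List.length_drop] at hg0
  have hdd : (S.drop s0).drop g0 = S.drop (s0 + g0) := List.drop_drop
  rw [hdd] at hrep
  rw [hA, hB, hrep]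
  simp only []
  apply ne_of_lt
  rcases hcases with ht | hE
  · -- negative total: the wrapped copy of B's best suffix undercuts it
    have hgW : (-(((S.length - (s0 + g0) : Nat)) : Int)) ∈
        PySem.List.pyRange (i - 1) (S.length : Int) 1 := by
      rw [PySem.List.mem_pyRange_one]
      constructor
      · push_cast; omega
      · push_cast; omega
    have hval := innerA_neg S (S.length - (s0 + g0)) (by omega) (by omega)
    have hidx : S.length - (S.length - (s0 + g0)) = s0 + g0 := by omega
    rw [hidx] at hval
    have hmem := List.mem_map_of_mem (f := pvInnerA S) hgW
    rw [hval] at hmem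
    exact lt_of_le_of_lt (fmin_le_mem _ _ _ hmem) (by omega)
  · -- an early suffix undercuts every late one, in particular B's best
    obtain ⟨t1, ht1, hlen1, hall⟩ := hE
    obtain ⟨pre, hpre⟩ := (List.mem_tails _ _).mp ht1
    have hplen : pre.length + t1.length = S.length := by
      have := congrArg List.length hpre
      simpa using this
    have hkdrop : S.drop pre.length = t1 := by rw [← hpre]; exact List.drop_left
    have hmem0 : ((pre.length : Nat) : Int) ∈ PySem.List.pyRange (i - 1) (S.length : Int) 1 := by
      rw [PySem.List.mem_pyRange_one]
      constructor
      · push_cast; omega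
      · push_cast; omega
    have hv0 : pvInnerA S ((pre.length : Nat) : Int) = t1.sum := by
      rw [innerA_eq S S.length _ (by omega), hkdrop]
    have hmemA := List.mem_map_of_mem (f := pvInnerA S) hmem0
    rw [hv0] at hmemA
    have ht2 : S.drop (s0 + g0) ∈ S.tails := (List.mem_tails _ _).mpr (List.drop_suffix _ S)
    have hlt := hall (S.drop (s0 + g0)) ht2
      (by
        intro h
        have := congrArg List.length h
        simp only [List.length_drop, List.length_nil] at this
        omega)
      (by rw [List.length_drop]; push_cast; omega)
    exact lt_of_le_of_lt (fmin_le_mem _ _ _ hmemA) hlt
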